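-- pv_equiv track=rewrite | github.com/bryant273092/Python-Projects | ile1materials/Lab 7/980148/exam.py | talker_frequency
-- ===== SOURCE A (Python) =====
-- def talker_frequency (db : {str:{str:[int]}}) -> [(str,int)]:
--     talker_freq = []
--     for k in db:
--         count = 0
--         for r in db[k].values():  #checking for
--             count += len(r)
--
--         for c in db:
--             for reciev in db[c]:
--                 if reciev == k:
--                     count += len(db[c][reciev])
--         talker_freq.append((k, count))
--     return sorted(talker_freq, key = (lambda x: (x[1], x[0])), reverse = True)
-- ===== SOURCE B (Python) =====
-- def talker_frequency(db: {str: {str: [int]}}) -> [(str, int)]: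
--     # One pass over all edges: accumulate sent totals and received counts,
--     # then one lookup per talker; sort once.  O(E + N log N) instead of O(N*E).
--     recv = {}
--     sent = {}
--     for k, inner in db.items():
--         total = 0
--         for r, msgs in inner.items():
--             n = len(msgs)
--             total += n
--             recv[r] = recv.get(r, 0) + n
--         sent[k] = total
--     res = [(k, sent[k] + recv.get(k, 0)) for k in db]
--     return sorted(res, key=(lambda x: (x[1], x[0])), reverse=True)
-- ===== Notes on version B (the rewrite author's own statement) =====
-- stated objective: faster
-- what changed: Replaced A's per-talker rescan of the whole database (for each key, a nested loop over all senders and their receiver lists) by a single pass that accumulates received counts into a dict and sent totals per key, followed by one O(1) lookup per talker before the same sort.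
import Mathlib
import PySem

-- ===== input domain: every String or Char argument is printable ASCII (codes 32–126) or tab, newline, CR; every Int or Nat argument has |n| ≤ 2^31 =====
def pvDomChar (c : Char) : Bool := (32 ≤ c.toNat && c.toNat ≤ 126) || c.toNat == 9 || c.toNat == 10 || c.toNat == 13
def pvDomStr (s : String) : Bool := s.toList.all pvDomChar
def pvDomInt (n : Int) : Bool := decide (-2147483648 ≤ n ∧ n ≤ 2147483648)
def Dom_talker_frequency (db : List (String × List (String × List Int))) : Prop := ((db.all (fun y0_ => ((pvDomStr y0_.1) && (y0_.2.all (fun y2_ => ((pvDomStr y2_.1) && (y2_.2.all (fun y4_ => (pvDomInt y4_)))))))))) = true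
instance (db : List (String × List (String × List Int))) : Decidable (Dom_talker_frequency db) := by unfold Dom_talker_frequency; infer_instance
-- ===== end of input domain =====

-- B replaces A's per-talker rescan of the whole database by one pass accumulating
-- received counts in a dict and sent totals per key (faster: O(E + N log N) vs O(N*E)).

-- ===== PORT A =====
-- Python dict lookup db[k] on an association list with unique keys (first match);
-- exact for the dict inputs Pre_ describes, where every looked-up key is present.
def alook {β : Type} (l : List (String × β)) (k : String) (d : β) : β :=
  match l.find? (fun p => p.1 == k) with
  | some p => p.2
  | none => d

def talker_frequency (db : List (String × List (String × List Int))) : List (String × Int) :=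
  PySem.List.sorted2
    (db.foldl (fun acc kp =>
      acc ++ [(kp.1,
        db.foldl (fun c cp =>
          (alook db cp.1 []).foldl (fun c2 rp =>
            if rp.1 == kp.1 then c2 + ((alook (alook db cp.1 []) rp.1 []).length : Int) else c2) c)
          ((alook db kp.1 []).foldl (fun c rp => c + (rp.2.length : Int)) 0))]) [])
    (fun x => x.2) (fun x => x.1) true

-- ===== PORT B =====
def talker_frequency_alt (db : List (String × List (String × List Int))) : List (String × Int) :=
  let rs := db.foldl
      (fun (rs : PySem.Dict String Int × PySem.Dict String Int) kp =>
        let st := kp.2.foldl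
          (fun (st : PySem.Dict String Int × Int) rp =>
            (st.1.insert rp.1 (st.1.getD rp.1 0 + (rp.2.length : Int)), st.2 + (rp.2.length : Int)))
          (rs.1, 0)
        (st.1, rs.2.insert kp.1 st.2))
      (PySem.Dict.empty, PySem.Dict.empty)
  PySem.List.sorted2
    (db.map (fun kp => (kp.1, rs.2.getD kp.1 0 + rs.1.getD kp.1 0)))
    (fun x => x.2) (fun x => x.1) true

-- ===== PRECONDITION & SPEC =====
-- Python's argument is a dict of dicts, which cannot carry duplicate keys; Pre_ excludes
-- association lists with a duplicate outer or inner key, which no dict input represents.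
def Pre_talker_frequency (db : List (String × List (String × List Int))) : Prop :=
  (db.map Prod.fst).Nodup ∧ ∀ p ∈ db, (p.2.map Prod.fst).Nodup
instance (db : List (String × List (String × List Int))) : Decidable (Pre_talker_frequency db) := by
  unfold Pre_talker_frequency; infer_instance

def pvWitness_talker_frequency : (List (String × List (String × List Int))) :=
  [("a", [("b", [1, 2])]), ("b", [("a", [3]), ("c", [])])]

def Spec_talker_frequency (db : List (String × List (String × List Int))) (out : List (String × Int)) : Prop := out = talker_frequency_alt db
instance (db : List (String × List (String × List Int))) (out : List (String × Int)) : Decidable (Spec_talker_frequency db out) := by unfold Spec_talker_frequency; infer_instance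

-- ===== CLAIM (what is proved, stated in full; the proofs are below) =====
def Claim_equal_talker_frequency : Prop := ∀ (db : List (String × List (String × List Int))), Dom_talker_frequency db → Pre_talker_frequency db → Spec_talker_frequency db (talker_frequency db)

-- ===== LEMMAS AND PROOFS =====

/-- total number of messages sent in one inner dict -/
def sentSum (inner : List (String × List Int)) : Int :=
  (inner.map (fun rp => (rp.2.length : Int))).sum

/-- number of messages received by `k` over the whole database -/
def recvSum (db : List (String × List (String × List Int))) (k : String) : Int :=
  (db.map (fun cp =>
    ((cp.2.filter (fun rp => rp.1 == k)).map (fun rp => (rp.2.length : Int))).sum)).sum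

/-- with unique keys, association-list lookup of a member's key yields that member -/
theorem find?_of_mem {β : Type} (l : List (String × β)) (p : String × β)
    (hnd : (l.map Prod.fst).Nodup) (hm : p ∈ l) :
    l.find? (fun q => q.1 == p.1) = some p := by
  induction l with
  | nil => cases hm
  | cons h t ih =>
    simp only [List.map_cons, List.nodup_cons] at hnd
    rcases List.mem_cons.mp hm with rfl | hmt
    · simp [List.find?]
    · have hne : h.1 ≠ p.1 := by
        intro he
        exact hnd.1 (he ▸ List.mem_map.mpr ⟨p, hmt, rfl⟩)
      rw [List.find?_cons_of_neg (by simp [hne]), ih hnd.2 hmt]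

theorem alook_of_mem {β : Type} (l : List (String × β)) (p : String × β) (d : β)
    (hnd : (l.map Prod.fst).Nodup) (hm : p ∈ l) : alook l p.1 d = p.2 := by
  simp [alook, find?_of_mem l p hnd hm]

theorem foldl_add_if {α : Type} (p : α → Bool) (g : α → Int) (l : List α) :
    ∀ c : Int, l.foldl (fun c x => if p x then c + g x else c) c
      = c + ((l.filter p).map g).sum := by
  induction l with
  | nil => intro c; simp
  | cons h t ih =>
    intro c
    by_cases hp : p h <;> simp [List.foldl_cons, hp, ih, add_assoc]

/-- A's inner double loop computes, for each sender, the received-by-`k` total -/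
theorem a_inner_eq (db : List (String × List (String × List Int))) (k : String)
    (hnd : (db.map Prod.fst).Nodup)
    (hin : ∀ p ∈ db, (p.2.map Prod.fst).Nodup)
    (cp : String × List (String × List Int)) (hcp : cp ∈ db) (c : Int) :
    (alook db cp.1 []).foldl (fun c2 rp =>
        if rp.1 == k then c2 + ((alook (alook db cp.1 []) rp.1 []).length : Int) else c2) c
      = c + ((cp.2.filter (fun rp => rp.1 == k)).map (fun rp => (rp.2.length : Int))).sum := by
  rw [alook_of_mem db cp [] hnd hcp]
  rw [PySem.List.foldl_congr_mem cp.2 _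
    (fun c2 rp => if rp.1 == k then c2 + (rp.2.length : Int) else c2) c
    (fun c2 rp hrp => by rw [alook_of_mem cp.2 rp [] (hin cp hcp) hrp])]
  exact foldl_add_if _ _ _ c

/-- A's whole count for a talker `kp` -/
theorem a_count_eq (db : List (String × List (String × List Int)))
    (hnd : (db.map Prod.fst).Nodup)
    (hin : ∀ p ∈ db, (p.2.map Prod.fst).Nodup)
    (kp : String × List (String × List Int)) (hkp : kp ∈ db) :
    db.foldl (fun c cp =>
        (alook db cp.1 []).foldl (fun c2 rp =>
          if rp.1 == kp.1 then c2 + ((alook (alook db cp.1 []) rp.1 []).length : Int) else c2) c)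
      ((alook db kp.1 []).foldl (fun c rp => c + (rp.2.length : Int)) 0)
      = sentSum kp.2 + recvSum db kp.1 := by
  have h1 : (alook db kp.1 []).foldl (fun c rp => c + (rp.2.length : Int)) 0 = sentSum kp.2 := by
    rw [alook_of_mem db kp [] hnd hkp, PySem.List.foldl_add]
    simp [sentSum]
  rw [h1,
    PySem.List.foldl_congr_mem db _
      (fun c cp => c + ((cp.2.filter (fun rp => rp.1 == kp.1)).map
        (fun rp => (rp.2.length : Int))).sum) (sentSum kp.2)
      (fun c cp hcp => a_inner_eq db kp.1 hnd hin cp hcp c),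
    PySem.List.foldl_add]
  rfl

/-- B's inner fold splits into the recv-dict fold and the sent total -/
theorem b_inner_split (inner : List (String × List Int)) :
    ∀ (r : PySem.Dict String Int) (t : Int),
    inner.foldl (fun (st : PySem.Dict String Int × Int) rp =>
        (st.1.insert rp.1 (st.1.getD rp.1 0 + (rp.2.length : Int)), st.2 + (rp.2.length : Int)))
      (r, t)
    = (inner.foldl (fun r rp => r.insert rp.1 (r.getD rp.1 0 + (rp.2.length : Int))) r,
       t + sentSum inner) := by
  induction inner with
  | nil => intro r t; simp [sentSum]
  | cons h tl ih =>
    intro r t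
    simp only [List.foldl_cons, ih, sentSum, List.map_cons, List.sum_cons]
    ring_nf

/-- B's outer fold in closed form: the two dicts evolve independently -/
theorem b_outer_split (db : List (String × List (String × List Int))) :
    ∀ (r0 s0 : PySem.Dict String Int),
    db.foldl (fun (rs : PySem.Dict String Int × PySem.Dict String Int) kp =>
        let st := kp.2.foldl
          (fun (st : PySem.Dict String Int × Int) rp =>
            (st.1.insert rp.1 (st.1.getD rp.1 0 + (rp.2.length : Int)), st.2 + (rp.2.length : Int)))
          (rs.1, 0)
        (st.1, rs.2.insert kp.1 st.2))
      (r0, s0)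
    = (db.foldl (fun r kp =>
          kp.2.foldl (fun r rp => r.insert rp.1 (r.getD rp.1 0 + (rp.2.length : Int))) r) r0,
       db.foldl (fun s kp => s.insert kp.1 (sentSum kp.2)) s0) := by
  intro r0 s0
  rw [PySem.List.foldl_congr_mem db _
    (fun (rs : PySem.Dict String Int × PySem.Dict String Int) kp =>
       (kp.2.foldl (fun r rp => r.insert rp.1 (r.getD rp.1 0 + (rp.2.length : Int))) rs.1,
        rs.2.insert kp.1 (sentSum kp.2))) (r0, s0)
    (fun acc kp _ => by simp only [b_inner_split, zero_add])]
  exact PySem.List.foldl_prod_mk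
    (fun r kp => kp.2.foldl (fun r rp => r.insert rp.1 (r.getD rp.1 0 + (rp.2.length : Int))) r)
    (fun s kp => s.insert kp.1 (sentSum kp.2)) db r0 s0

theorem recv_inner_getD (inner : List (String × List Int)) (k : String) :
    ∀ r : PySem.Dict String Int,
    (inner.foldl (fun r rp => r.insert rp.1 (r.getD rp.1 0 + (rp.2.length : Int))) r).getD k 0
      = r.getD k 0 + ((inner.filter (fun rp => rp.1 == k)).map (fun rp => (rp.2.length : Int))).sum := by
  induction inner with
  | nil => intro r; simp
  | cons h t ih =>
    intro r
    simp only [List.foldl_cons, ih]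
    by_cases hk : k = h.1
    · subst hk
      simp [PySem.Dict.getD_insert_self, add_assoc]
    · have : ¬ (h.1 == k) := by simpa [beq_iff_eq] using fun he => hk he.symm
      simp [PySem.Dict.getD_insert_of_ne _ _ _ hk, this]

theorem recv_getD (db : List (String × List (String × List Int))) (k : String) :
    ∀ r0 : PySem.Dict String Int,
    (db.foldl (fun r kp =>
        kp.2.foldl (fun r rp => r.insert rp.1 (r.getD rp.1 0 + (rp.2.length : Int))) r) r0).getD k 0
      = r0.getD k 0 + recvSum db k := by
  induction db with
  | nil => intro r0; simp [recvSum]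
  | cons h t ih =>
    intro r0
    simp only [List.foldl_cons, ih, recv_inner_getD, recvSum, List.map_cons, List.sum_cons]
    ring

theorem sent_getD_of_not_mem (db : List (String × List (String × List Int))) (k : String)
    (hk : k ∉ db.map Prod.fst) :
    ∀ s0 : PySem.Dict String Int,
    (db.foldl (fun s kp => s.insert kp.1 (sentSum kp.2)) s0).getD k 0 = s0.getD k 0 := by
  induction db with
  | nil => intro s0; rfl
  | cons h t ih =>
    intro s0
    simp only [List.map_cons, List.mem_cons, not_or] at hk
    simp only [List.foldl_cons, ih hk.2, PySem.Dict.getD_insert_of_ne _ _ _ hk.1]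

theorem sent_getD (db : List (String × List (String × List Int)))
    (hnd : (db.map Prod.fst).Nodup)
    (kp : String × List (String × List Int)) (hkp : kp ∈ db) :
    ∀ s0 : PySem.Dict String Int,
    (db.foldl (fun s kp => s.insert kp.1 (sentSum kp.2)) s0).getD kp.1 0 = sentSum kp.2 := by
  induction db with
  | nil => cases hkp
  | cons h t ih =>
    intro s0
    simp only [List.map_cons, List.nodup_cons] at hnd
    rcases List.mem_cons.mp hkp with rfl | hmt
    · simp only [List.foldl_cons]
      rw [sent_getD_of_not_mem t kp.1 hnd.1, PySem.Dict.getD_insert_self]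
    · exact ih hnd.2 hmt _

-- ===== VERDICT (by name: the statement is the Claim_ definition above) =====
theorem talker_frequency_spec : Claim_equal_talker_frequency := by
  intro db _ hpre
  obtain ⟨hnd, hin⟩ := hpre
  unfold Spec_talker_frequency talker_frequency talker_frequency_alt
  rw [b_outer_split]
  simp only []
  congr 1
  rw [PySem.List.foldl_append_singleton_eq_map
    (fun kp => (kp.1,
      db.foldl (fun c cp =>
        (alook db cp.1 []).foldl (fun c2 rp =>
          if rp.1 == kp.1 then c2 + ((alook (alook db cp.1 []) rp.1 []).length : Int) else c2) c)
        ((alook db kp.1 []).foldl (fun c rp => c + (rp.2.length : Int)) 0))) db []]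
  simp only [List.nil_append]
  exact List.map_congr_left (fun kp hkp => by
    rw [a_count_eq db hnd hin kp hkp, sent_getD db hnd kp hkp, recv_getD]
    simp)
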